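-- pv_equiv track=rewrite | github.com/xionglei191-goo/vanke_chk_list | auto_review_system/rag_engine/review_experience.py | infer_review_intents
-- ===== SOURCE A (Python) =====
-- INTENT_BY_PATTERN = {
--     "missing_parameter": ["指导施工", "便于验收", "支撑复核"],
--     "method_mismatch": ["指导施工", "控制质量风险"],
--     "work_split_or_pricing": ["支撑计价", "避免结算争议"],
--     "sequence_or_logic": ["指导施工", "避免返工"],
--     "site_condition_unverified": ["支撑复核", "避免错判现场"],
--     "acceptance_missing": ["便于验收", "留存复核证据"],
--     "interface_scope": ["明确界面", "支撑计价"],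
-- }
--
-- def infer_review_intents(problem_patterns, dimension):
--     intents = []
--     for pattern in problem_patterns:
--         for intent in INTENT_BY_PATTERN.get(pattern["code"], []):
--             if intent not in intents:
--                 intents.append(intent)
--     if not intents:
--         fallback = {
--             "描述完整性": "指导施工",
--             "工艺合理性": "控制质量风险",
--             "分项拆分": "支撑计价",
--             "逻辑自洽": "支撑复核",
--         }
--         intents.append(fallback.get(dimension, "支撑复核"))
--     return intents
-- ===== SOURCE B (Python) =====
-- INTENT_BY_PATTERN = {
--     "missing_parameter": ["指导施工", "便于验收", "支撑复核"],
--     "method_mismatch": ["指导施工", "控制质量风险"],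
--     "work_split_or_pricing": ["支撑计价", "避免结算争议"],
--     "sequence_or_logic": ["指导施工", "避免返工"],
--     "site_condition_unverified": ["支撑复核", "避免错判现场"],
--     "acceptance_missing": ["便于验收", "留存复核证据"],
--     "interface_scope": ["明确界面", "支撑计价"],
-- }
--
--
-- def _dedup(xs):
--     # recursive head-and-filter dedup: keep the head, strip its later
--     # occurrences from the tail, recurse on what remains (first-seen order;
--     # depth = number of distinct intents, at most 11 here)
--     if not xs:
--         return []
--     head = xs[0]
--     return [head] + _dedup([x for x in xs[1:] if x != head])
--
--
-- def infer_review_intents(problem_patterns, dimension):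
--     flat = [intent
--             for pattern in problem_patterns
--             for intent in INTENT_BY_PATTERN.get(pattern["code"], [])]
--     intents = _dedup(flat)
--     if not intents:
--         fallback = {
--             "描述完整性": "指导施工",
--             "工艺合理性": "控制质量风险",
--             "分项拆分": "支撑计价",
--             "逻辑自洽": "支撑复核",
--         }
--         intents.append(fallback.get(dimension, "支撑复核"))
--     return intents
-- ===== Notes on version B (the rewrite author's own statement) =====
-- stated objective: alternative
-- what changed: Replaces A's accumulate-if-not-already-present nested loop with a flatten comprehension followed by a recursive head-and-filter dedup (keep the head, filter its duplicates out of the tail, recurse) -- no seen-accumulator or membership test against the output at all; order, fallback and KeyError behaviour unchanged.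
import Mathlib
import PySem

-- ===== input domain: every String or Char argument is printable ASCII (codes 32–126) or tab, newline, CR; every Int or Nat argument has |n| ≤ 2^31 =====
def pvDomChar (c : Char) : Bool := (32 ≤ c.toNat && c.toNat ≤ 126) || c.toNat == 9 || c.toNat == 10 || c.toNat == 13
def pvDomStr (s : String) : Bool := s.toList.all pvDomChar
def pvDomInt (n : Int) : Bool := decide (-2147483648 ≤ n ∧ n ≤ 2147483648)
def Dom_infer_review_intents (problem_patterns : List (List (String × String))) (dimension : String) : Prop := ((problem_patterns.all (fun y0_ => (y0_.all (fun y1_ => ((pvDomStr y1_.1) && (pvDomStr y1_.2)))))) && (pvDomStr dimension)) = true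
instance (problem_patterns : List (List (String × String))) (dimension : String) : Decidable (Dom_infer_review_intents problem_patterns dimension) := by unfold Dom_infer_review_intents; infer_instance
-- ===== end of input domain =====

-- B flattens all intents with a comprehension and dedups by recursive head-and-filter (no seen-accumulator); same values, alternative decomposition.

-- ===== PORT A =====
def INTENT_BY_PATTERN : PySem.Dict String (List String) := PySem.Dict.mk [
  ("missing_parameter", ["指导施工", "便于验收", "支撑复核"]),
  ("method_mismatch", ["指导施工", "控制质量风险"]),
  ("work_split_or_pricing", ["支撑计价", "避免结算争议"]),
  ("sequence_or_logic", ["指导施工", "避免返工"]),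
  ("site_condition_unverified", ["支撑复核", "避免错判现场"]),
  ("acceptance_missing", ["便于验收", "留存复核证据"]),
  ("interface_scope", ["明确界面", "支撑计价"])]

def FALLBACK : PySem.Dict String String := PySem.Dict.mk [
  ("描述完整性", "指导施工"),
  ("工艺合理性", "控制质量风险"),
  ("分项拆分", "支撑计价"),
  ("逻辑自洽", "支撑复核")]

-- pattern["code"]: first-match lookup; Python raises KeyError when absent — such inputs are excluded by Pre_ (the "" default is never reached inside Pre_)
def patternCode (pattern : List (String × String)) : String :=
  ((PySem.Dict.mk pattern).get? "code").getD ""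

def infer_review_intents (problem_patterns : List (List (String × String))) (dimension : String) : List String :=
  let intents := problem_patterns.foldl
    (fun intents pattern =>
      (INTENT_BY_PATTERN.getD (patternCode pattern) []).foldl
        (fun intents intent => if intents.contains intent then intents else intents ++ [intent])
        intents)
    []
  if intents.isEmpty then intents ++ [FALLBACK.getD dimension "支撑复核"] else intents

-- ===== PORT B =====
-- _dedup: recursive head-and-filter dedup (first-seen order)
def dedupRec : List String → List String
  | [] => []
  | x :: rest => x :: dedupRec (rest.filter (fun y => y != x))
termination_by xs => xs.length
decreasing_by
  simp only [List.length_cons, List.length_unattach]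
  exact Nat.lt_succ_of_le (le_trans (List.length_filter_le _ _) (by simp))

def infer_review_intents_alt (problem_patterns : List (List (String × String))) (dimension : String) : List String :=
  let flat := problem_patterns.flatMap (fun pattern => INTENT_BY_PATTERN.getD (patternCode pattern) [])
  let intents := dedupRec flat
  if intents.isEmpty then intents ++ [FALLBACK.getD dimension "支撑复核"] else intents

-- ===== PRECONDITION & SPEC =====
-- Pre_ excludes exactly the inputs where some pattern lacks a "code" key: there Python A (and B) raise KeyError.
def Pre_infer_review_intents (problem_patterns : List (List (String × String))) (dimension : String) : Prop :=
  (problem_patterns.all (fun pattern => pattern.any (fun p => p.1 == "code"))) = true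
instance (problem_patterns : List (List (String × String))) (dimension : String) : Decidable (Pre_infer_review_intents problem_patterns dimension) := by unfold Pre_infer_review_intents; infer_instance

def pvWitness_infer_review_intents : (List (List (String × String))) × String :=
  ([[("code", "missing_parameter")], [("code", "interface_scope")]], "x")

def Spec_infer_review_intents (problem_patterns : List (List (String × String))) (dimension : String) (out : List String) : Prop := out = infer_review_intents_alt problem_patterns dimension
instance (problem_patterns : List (List (String × String))) (dimension : String) (out : List String) : Decidable (Spec_infer_review_intents problem_patterns dimension out) := by unfold Spec_infer_review_intents; infer_instance

-- ===== CLAIM (what is proved, stated in full; the proofs are below) =====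
def Claim_equal_infer_review_intents : Prop := ∀ (problem_patterns : List (List (String × String))) (dimension : String), Dom_infer_review_intents problem_patterns dimension → Pre_infer_review_intents problem_patterns dimension → Spec_infer_review_intents problem_patterns dimension (infer_review_intents problem_patterns dimension)

-- ===== LEMMAS AND PROOFS =====
-- A's accumulate-if-new fold over a list l, started from acc, appends exactly the
-- head-and-filter dedup of the elements of l not already in acc.
lemma foldl_step_eq_dedupRec (l : List String) (acc : List String) :
    l.foldl (fun intents intent => if intents.contains intent then intents else intents ++ [intent]) acc
    = acc ++ dedupRec (l.filter (fun y => !acc.contains y)) := by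
  induction l generalizing acc with
  | nil => simp [dedupRec]
  | cons x rest ih =>
    simp only [List.foldl_cons, List.filter_cons]
    by_cases h : x ∈ acc
    · have hc : acc.contains x = true := by simpa using h
      rw [if_pos hc, ih]
      congr 2
      simp [h]
    · have hc : acc.contains x = false := by simpa using h
      rw [if_neg (by simp [h]), ih, hc]
      simp only [Bool.not_false, if_true, dedupRec, List.append_assoc, List.singleton_append]
      congr 2
      congr 1
      rw [List.filter_filter]
      apply List.filter_congr
      intro y _
      by_cases hyx : y = x <;> by_cases hya : y ∈ acc <;> simp [hyx, hya, h]

-- A's nested per-pattern fold is the single fold over the flattened intent list.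
lemma foldl_intents_eq (pp : List (List (String × String))) :
    pp.foldl
      (fun intents pattern =>
        (INTENT_BY_PATTERN.getD (patternCode pattern) []).foldl
          (fun intents intent => if intents.contains intent then intents else intents ++ [intent])
          intents)
      []
    = dedupRec (pp.flatMap (fun pattern => INTENT_BY_PATTERN.getD (patternCode pattern) [])) := by
  rw [← List.foldl_flatMap, foldl_step_eq_dedupRec]
  simp

-- ===== VERDICT (by name: the statement is the Claim_ definition above) =====
theorem infer_review_intents_spec : Claim_equal_infer_review_intents := by
  intro pp dim _ _
  unfold Spec_infer_review_intents infer_review_intents infer_review_intents_alt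
  rw [foldl_intents_eq]
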